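-- pv_equiv track=rewrite | github.com/dungdm93/code-gym | hackerrank/line-up.py | calculate
-- ===== SOURCE A (Python) =====
-- def calculate(heights):
--     man = []
--     tree = []
--     for i, h in enumerate(heights):
--         if h > 0:
--             man.append(h)
--         else:
--             tree.append(i)
--     man.sort()
--     output = man.copy()
--     for i in tree:
--         output.insert(i, -1)
--     return output
-- ===== SOURCE B (Python) =====
-- def calculate(heights):
--     men = iter(sorted(h for h in heights if h > 0))
--     return [-1 if h <= 0 else next(men) for h in heights]
-- ===== Notes on version B (the rewrite author's own statement) =====
-- stated objective: faster
-- what changed: Instead of sorting the men and then repeatedly calling list.insert(i, -1) for each tree index (each insert shifts the tail), B does a single pass over heights, emitting -1 for non-positive entries and consuming the sorted men iterator for positive ones.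
import Mathlib
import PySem

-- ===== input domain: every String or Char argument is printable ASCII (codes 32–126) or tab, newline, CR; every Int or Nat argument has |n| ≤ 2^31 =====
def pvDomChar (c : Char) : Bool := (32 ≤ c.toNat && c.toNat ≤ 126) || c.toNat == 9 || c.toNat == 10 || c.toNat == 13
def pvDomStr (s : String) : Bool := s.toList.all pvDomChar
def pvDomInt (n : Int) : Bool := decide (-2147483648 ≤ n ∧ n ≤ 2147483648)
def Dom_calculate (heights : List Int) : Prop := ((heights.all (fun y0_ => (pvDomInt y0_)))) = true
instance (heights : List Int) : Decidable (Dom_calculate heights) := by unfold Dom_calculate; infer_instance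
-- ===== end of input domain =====

-- B replaces A's per-tree-index list.insert passes with one pass that fills sorted men into the positive slots (objective: faster).

-- ===== PORT A =====
def calculate (heights : List Int) : List Int :=
  let st := (PySem.List.enumerate heights 0).foldl
    (fun (p : List Int × List Int) ih =>
      if ih.2 > 0 then (p.1 ++ [ih.2], p.2) else (p.1, p.2 ++ [ih.1]))
    ([], [])
  let man := PySem.List.sorted st.1 (fun x => x) false
  st.2.foldl (fun out i => PySem.List.insert out i (-1)) man

-- ===== PORT B =====
-- one pass over heights, consuming the sorted-men iterator (headI/tail = next on a list-backed iterator)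
def fillB : List Int → List Int → List Int
  | [], _ => []
  | h :: t, s => if h > 0 then s.headI :: fillB t s.tail else (-1) :: fillB t s

def calculate_alt (heights : List Int) : List Int :=
  fillB heights (PySem.List.sorted (heights.filter (fun h => decide (0 < h))) (fun x => x) false)

-- ===== PRECONDITION & SPEC =====
def Spec_calculate (heights : List Int) (out : List Int) : Prop := out = calculate_alt heights
instance (heights : List Int) (out : List Int) : Decidable (Spec_calculate heights out) := by unfold Spec_calculate; infer_instance

-- ===== CLAIM (what is proved, stated in full; the proofs are below) =====
def Claim_equal_calculate : Prop := ∀ (heights : List Int), Dom_calculate heights → Spec_calculate heights (calculate heights)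

-- ===== LEMMAS AND PROOFS =====

/-- the tree-index list A builds: positions (as Ints, offset `k`) of non-positive heights -/
def treeFrom : List Int → Int → List Int
  | [], _ => []
  | h :: t, k => if 0 < h then treeFrom t (k + 1) else k :: treeFrom t (k + 1)

lemma foldA_split (hs : List Int) (k : Int) (a b : List Int) :
    (PySem.List.enumerate hs k).foldl
      (fun (p : List Int × List Int) ih =>
        if ih.2 > 0 then (p.1 ++ [ih.2], p.2) else (p.1, p.2 ++ [ih.1]))
      (a, b)
    = (a ++ hs.filter (fun h => decide (0 < h)), b ++ treeFrom hs k) := by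
  induction hs generalizing k a b with
  | nil => simp [PySem.List.enumerate_nil, treeFrom]
  | cons h t ih =>
    rw [PySem.List.enumerate_cons]
    by_cases hp : 0 < h
    · simp only [List.foldl_cons, hp, if_pos, treeFrom, List.filter_cons, ih]
      simp
    · have : ¬ (h > 0) := hp
      simp only [List.foldl_cons, this, treeFrom, List.filter_cons, ih]
      simp

lemma mainFold (hs : List Int) (pre s : List Int)
    (hlen : s.length = (hs.filter (fun h => decide (0 < h))).length) :
    (treeFrom hs (pre.length : Int)).foldl
        (fun out i => PySem.List.insert out i (-1)) (pre ++ s)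
    = pre ++ fillB hs s := by
  induction hs generalizing pre s with
  | nil =>
    have : s = [] := List.eq_nil_of_length_eq_zero (by simpa using hlen)
    simp [treeFrom, fillB, this]
  | cons h t ih =>
    by_cases hp : 0 < h
    · -- positive: first slot of the suffix is consumed
      have hs' : s ≠ [] := by
        intro hnil
        rw [hnil] at hlen
        simp [decide_eq_true hp] at hlen
      obtain ⟨a, s', rfl⟩ := List.exists_cons_of_ne_nil hs'
      have hlen' : s'.length = (t.filter (fun h => decide (0 < h))).length := by
        simpa [List.filter_cons, decide_eq_true hp] using hlen
      have hcast : ((pre ++ [a]).length : Int) = (pre.length : Int) + 1 := by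
        simp
      have := ih (pre ++ [a]) s' hlen'
      rw [hcast] at this
      simp only [treeFrom, if_pos hp]
      calc (treeFrom t ((pre.length : Int) + 1)).foldl
              (fun out i => PySem.List.insert out i (-1)) (pre ++ a :: s')
          = (treeFrom t ((pre.length : Int) + 1)).foldl
              (fun out i => PySem.List.insert out i (-1)) ((pre ++ [a]) ++ s') := by
              simp
        _ = (pre ++ [a]) ++ fillB t s' := this
        _ = pre ++ fillB (h :: t) (a :: s') := by
              simp [fillB, if_pos hp]
    · -- non-positive: A inserts -1 at position pre.length
      have hlen' : s.length = (t.filter (fun h => decide (0 < h))).length := by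
        simpa [List.filter_cons, decide_eq_false hp] using hlen
      have hle : pre.length ≤ (pre ++ s).length := by simp
      have hins : PySem.List.insert (pre ++ s) ((pre.length : Nat) : Int) (-1)
          = pre ++ (-1) :: s := by
        rw [PySem.List.insert_natCast _ _ _ hle]
        simp
      have hcast : ((pre ++ [(-1 : Int)]).length : Int) = (pre.length : Int) + 1 := by
        simp
      have := ih (pre ++ [(-1 : Int)]) s hlen'
      rw [hcast] at this
      simp only [treeFrom, if_neg hp, List.foldl_cons, hins]
      calc (treeFrom t ((pre.length : Int) + 1)).foldl
              (fun out i => PySem.List.insert out i (-1)) (pre ++ (-1) :: s)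
          = (treeFrom t ((pre.length : Int) + 1)).foldl
              (fun out i => PySem.List.insert out i (-1)) ((pre ++ [(-1 : Int)]) ++ s) := by
              simp
        _ = (pre ++ [(-1 : Int)]) ++ fillB t s := this
        _ = pre ++ fillB (h :: t) s := by
              simp [fillB, if_neg hp]

-- ===== VERDICT (by name: the statement is the Claim_ definition above) =====
theorem calculate_spec : Claim_equal_calculate := by
  intro heights _
  unfold Spec_calculate calculate calculate_alt
  rw [foldA_split]
  simp only [List.nil_append]
  have hlen : (PySem.List.sorted (heights.filter (fun h => decide (0 < h)))
        (fun x => x) false).length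
      = (heights.filter (fun h => decide (0 < h))).length :=
    PySem.List.length_sorted _ _ _
  have := mainFold heights []
      (PySem.List.sorted (heights.filter (fun h => decide (0 < h))) (fun x => x) false) hlen
  simpa using this
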